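-- pv_equiv track=rewrite | github.com/EDA-Teaching-RJH/assignment-foundations-of-programming-OceanMan441 | fleet_manager.py | calcuate_payroll
-- ===== SOURCE A (Python) =====
-- def calcuate_payroll(ranks):
--     total = 0
--
--     for rank in ranks:
--         if rank == "Captain":
--             total += 1000
--         elif rank == "Commander":
--             total += 800
--         elif rank == "Lt. Commander":
--             total += 600
--         elif rank == "Lieutenant":
--             total += 400
--         elif rank == "Ensign":
--             total += 200
--
--     return total
-- ===== SOURCE B (Python) =====
-- def calcuate_payroll(ranks):
--     tally = {}
--     for r in ranks:
--         tally[r] = tally.get(r, 0) + 1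
--     pay_table = {"Captain": 1000, "Commander": 800, "Lt. Commander": 600,
--                  "Lieutenant": 400, "Ensign": 200}
--     return sum(rate * tally.get(rank, 0) for rank, rate in pay_table.items())
-- ===== Notes on version B (the rewrite author's own statement) =====
-- stated objective: alternative
-- what changed: B first builds a frequency tally of the ranks in one pass, then computes the total as a weighted sum over the fixed five-entry pay table, instead of adding a constant per element inside an if/elif chain.
import Mathlib
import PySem

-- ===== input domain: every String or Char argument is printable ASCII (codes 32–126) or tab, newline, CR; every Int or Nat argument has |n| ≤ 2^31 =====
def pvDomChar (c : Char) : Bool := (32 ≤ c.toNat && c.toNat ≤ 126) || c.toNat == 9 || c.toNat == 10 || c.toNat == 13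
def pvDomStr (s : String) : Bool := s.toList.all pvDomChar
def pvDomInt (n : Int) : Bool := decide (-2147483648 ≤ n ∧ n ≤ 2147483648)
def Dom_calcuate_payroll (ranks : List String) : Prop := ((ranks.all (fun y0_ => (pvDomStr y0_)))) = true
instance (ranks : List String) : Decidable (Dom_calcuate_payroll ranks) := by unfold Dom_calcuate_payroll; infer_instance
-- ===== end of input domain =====

-- B replaces A's per-element if/elif additions by a one-pass frequency tally followed by a weighted sum over the fixed pay table.


-- ===== PORT A =====
def calcuate_payroll (ranks : List String) : Int :=
  ranks.foldl (fun total rank =>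
    if rank == "Captain" then total + 1000
    else if rank == "Commander" then total + 800
    else if rank == "Lt. Commander" then total + 600
    else if rank == "Lieutenant" then total + 400
    else if rank == "Ensign" then total + 200
    else total) 0

-- ===== PORT B =====
def calcuate_payroll_alt (ranks : List String) : Int :=
  let tally : PySem.Dict String Int :=
    ranks.foldl (fun d r => d.insert r (d.getD r 0 + 1)) PySem.Dict.empty
  let pay_table : PySem.Dict String Int :=
    PySem.Dict.ofList [("Captain", 1000), ("Commander", 800), ("Lt. Commander", 600),
                       ("Lieutenant", 400), ("Ensign", 200)]
  pay_table.items.foldl (fun acc p => acc + p.2 * tally.getD p.1 0) 0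

-- ===== PRECONDITION & SPEC =====
def Spec_calcuate_payroll (ranks : List String) (out : Int) : Prop := out = calcuate_payroll_alt ranks
instance (ranks : List String) (out : Int) : Decidable (Spec_calcuate_payroll ranks out) := by unfold Spec_calcuate_payroll; infer_instance

-- ===== CLAIM (what is proved, stated in full; the proofs are below) =====
def Claim_equal_calcuate_payroll : Prop := ∀ (ranks : List String), Dom_calcuate_payroll ranks → Spec_calcuate_payroll ranks (calcuate_payroll ranks)

-- ===== LEMMAS AND PROOFS =====

-- A's loop accumulates 1000·#Captain + 800·#Commander + 600·#Lt. Commander + 400·#Lieutenant + 200·#Ensign.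
theorem calcA_counts (ranks : List String) (acc : Int) :
    ranks.foldl (fun total rank =>
      if rank == "Captain" then total + 1000
      else if rank == "Commander" then total + 800
      else if rank == "Lt. Commander" then total + 600
      else if rank == "Lieutenant" then total + 400
      else if rank == "Ensign" then total + 200
      else total) acc
    = acc + 1000 * (ranks.count "Captain" : Int) + 800 * (ranks.count "Commander" : Int)
        + 600 * (ranks.count "Lt. Commander" : Int) + 400 * (ranks.count "Lieutenant" : Int)
        + 200 * (ranks.count "Ensign" : Int) := by
  induction ranks generalizing acc with
  | nil => simp
  | cons r rest ih =>
    rw [List.foldl_cons, ih]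
    simp only [List.count_cons, beq_iff_eq]
    by_cases h1 : r = "Captain"
    · simp [h1]; ring
    by_cases h2 : r = "Commander"
    · simp [h1, h2]; ring
    by_cases h3 : r = "Lt. Commander"
    · simp [h1, h2, h3]; ring
    by_cases h4 : r = "Lieutenant"
    · simp [h1, h2, h3, h4]; ring
    by_cases h5 : r = "Ensign"
    · simp [h1, h2, h3, h4, h5]; ring
    simp [h1, h2, h3, h4, h5]

-- ===== VERDICT (by name: the statement is the Claim_ definition above) =====
theorem calcuate_payroll_spec : Claim_equal_calcuate_payroll := by
  intro ranks _
  unfold Spec_calcuate_payroll calcuate_payroll calcuate_payroll_alt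
  rw [calcA_counts]
  have hitems : (PySem.Dict.ofList [("Captain", (1000 : Int)), ("Commander", 800),
      ("Lt. Commander", 600), ("Lieutenant", 400), ("Ensign", 200)]).items
      = [("Captain", (1000 : Int)), ("Commander", 800), ("Lt. Commander", 600),
         ("Lieutenant", 400), ("Ensign", 200)] := by decide
  simp only [hitems, List.foldl_cons, List.foldl_nil,
    PySem.Dict.getD_foldl_insert_add_one, PySem.Dict.getD_empty]
  ring
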